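-- pv_equiv track=rewrite | github.com/BazkilleR/PSCP-Problem | coke.py | best_buy
-- ===== SOURCE A (Python) =====
-- def best_buy(price, promotion, new_price, want):
--     '''find best buy'''
--     get = 0
--     paid = 0
--
--     while get < want:
--         if promotion and get and not get % promotion:
--             paid += new_price
--         else:
--             paid += price
--         get += 1
--
--     return paid
-- ===== SOURCE B (Python) =====
-- def best_buy(price, promotion, new_price, want):
--     '''find best buy'''
--     n = max(want, 0)
--     if n == 0 or promotion == 0:
--         return n * price
--     k = (n - 1) // abs(promotion)
--     return k * new_price + (n - k) * price
-- ===== Notes on version B (the rewrite author's own statement) =====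
-- stated objective: faster
-- what changed: Replaced the O(want) counting loop by a closed form: the number of discounted units is (want-1)//abs(promotion), so the total is computed with constant arithmetic.
import Mathlib
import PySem

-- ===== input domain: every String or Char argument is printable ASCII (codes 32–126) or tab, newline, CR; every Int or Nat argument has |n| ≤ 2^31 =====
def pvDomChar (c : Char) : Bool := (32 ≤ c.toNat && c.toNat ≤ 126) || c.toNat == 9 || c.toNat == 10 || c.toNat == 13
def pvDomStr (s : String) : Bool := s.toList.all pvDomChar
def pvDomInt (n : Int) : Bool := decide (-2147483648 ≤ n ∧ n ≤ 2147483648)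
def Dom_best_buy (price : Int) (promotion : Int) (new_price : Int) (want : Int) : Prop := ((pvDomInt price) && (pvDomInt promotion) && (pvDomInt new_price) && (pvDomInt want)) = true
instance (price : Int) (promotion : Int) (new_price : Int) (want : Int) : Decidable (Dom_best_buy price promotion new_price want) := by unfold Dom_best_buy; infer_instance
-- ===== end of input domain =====

-- B replaces A's O(want) unit-by-unit loop with a closed-form count of discounted units (objective: faster, asymptotic).

-- ===== PORT A =====
-- the while loop of A, state (get, paid)
def best_buy_loop (price : Int) (promotion : Int) (new_price : Int) (want : Int) (get : Int) (paid : Int) : Int :=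
  if _h : get < want then
    best_buy_loop price promotion new_price want (get + 1)
      (if promotion ≠ 0 ∧ get ≠ 0 ∧ PySem.Int.mod get promotion = 0 then paid + new_price else paid + price)
  else paid
termination_by (want - get).toNat
decreasing_by omega

def best_buy (price : Int) (promotion : Int) (new_price : Int) (want : Int) : Int :=
  best_buy_loop price promotion new_price want 0 0

-- ===== PORT B =====
def best_buy_alt (price : Int) (promotion : Int) (new_price : Int) (want : Int) : Int :=
  let n := max want 0
  if n = 0 ∨ promotion = 0 then n * price
  else
    let k := PySem.Int.floordiv (n - 1) |promotion|
    k * new_price + (n - k) * price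

-- ===== PRECONDITION & SPEC =====
def Spec_best_buy (price : Int) (promotion : Int) (new_price : Int) (want : Int) (out : Int) : Prop := out = best_buy_alt price promotion new_price want
instance (price : Int) (promotion : Int) (new_price : Int) (want : Int) (out : Int) : Decidable (Spec_best_buy price promotion new_price want out) := by unfold Spec_best_buy; infer_instance

-- ===== CLAIM (what is proved, stated in full; the proofs are below) =====
def Claim_equal_best_buy : Prop := ∀ (price : Int) (promotion : Int) (new_price : Int) (want : Int), Dom_best_buy price promotion new_price want → Spec_best_buy price promotion new_price want (best_buy price promotion new_price want)

-- ===== LEMMAS AND PROOFS =====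

-- division step: for m > 0 and g ≥ 1, g/m - (g-1)/m is 1 if m ∣ g else 0
theorem ediv_step (m g : Int) (hm : 0 < m) (hg : 1 ≤ g) :
    g / m - (g - 1) / m = (if m ∣ g then 1 else 0) := by
  by_cases hd : m ∣ g
  · obtain ⟨q, rfl⟩ := hd
    have h1 : m * q / m = q := Int.mul_ediv_cancel_left q (by omega)
    have h2 : (m * q - 1) / m = q - 1 := by
      have : m * q - 1 = (m - 1) + m * (q - 1) := by ring
      rw [this, Int.add_mul_ediv_left _ _ (by omega : m ≠ 0),
        Int.ediv_eq_zero_of_lt (by omega) (by omega)]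
      ring
    simp [h1, h2]
  · have hr0 : g % m ≠ 0 := fun h => hd (Int.dvd_of_emod_eq_zero h)
    have hrlt : g % m < m := Int.emod_lt_of_pos g hm
    have hrge : 0 ≤ g % m := Int.emod_nonneg g (by omega)
    have hq : g = g % m + m * (g / m) := by
      have := Int.mul_ediv_add_emod g m; omega
    have h1 : g / m = g / m := rfl
    have h2 : (g - 1) / m = g / m := by
      conv_lhs => rw [show g - 1 = (g % m - 1) + m * (g / m) by omega]
      rw [Int.add_mul_ediv_left _ _ (by omega : m ≠ 0),
        Int.ediv_eq_zero_of_lt (by omega) (by omega)]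
      ring
    simp [hd, h2]

-- loop invariant: closed form of the remaining payment (promotion ≠ 0, 1 ≤ want)
theorem loop_closed (price promotion new_price want : Int) (hp : promotion ≠ 0)
    (hw : 1 ≤ want) :
    ∀ (fuel : Nat) (g paid : Int), 0 ≤ g → g ≤ want → (want - g).toNat = fuel →
      best_buy_loop price promotion new_price want g paid =
        paid + (want - g) * price
          + ((want - 1) / |promotion| - (max g 1 - 1) / |promotion|) * (new_price - price) := by
  intro fuel
  induction fuel with
  | zero =>
    intro g paid hg0 hgw hfuel
    have hge : g = want := by omega
    rw [best_buy_loop]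
    have : ¬ g < want := by omega
    simp only [this, dite_false]
    have : max g 1 = g := by omega
    rw [this]; subst hge; ring
  | succ n ih =>
    intro g paid hg0 hgw hfuel
    have hlt : g < want := by omega
    rw [best_buy_loop]
    simp only [hlt, dite_true]
    rw [ih (g + 1) _ (by omega) (by omega) (by omega)]
    have hm : (0:Int) < |promotion| := abs_pos.mpr hp
    have hmax1 : max (g + 1) 1 - 1 = g := by omega
    rw [hmax1]
    have hmod : (PySem.Int.mod g promotion = 0) ↔ (|promotion| ∣ g) := by
      rw [PySem.Int.mod_eq_zero_iff_dvd, abs_dvd]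
    by_cases hgz : g = 0
    · subst hgz
      norm_num
      ring
    · have hg1 : 1 ≤ g := by omega
      have hmaxg : max g 1 - 1 = g - 1 := by omega
      rw [hmaxg]
      have hstep := ediv_step |promotion| g hm hg1
      by_cases hd : |promotion| ∣ g
      · rw [if_pos ⟨hp, hgz, hmod.mpr hd⟩]
        rw [if_pos hd] at hstep
        have : g / |promotion| = (g - 1) / |promotion| + 1 := by omega
        rw [this]; ring
      · rw [if_neg (by rintro ⟨_, _, h⟩; exact hd (hmod.mp h))]
        rw [if_neg hd] at hstep
        have : g / |promotion| = (g - 1) / |promotion| := by omega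
        rw [this]; ring

-- promotion = 0 case: every unit costs price
theorem loop_price (price promotion new_price want : Int) (hp : promotion = 0) :
    ∀ (fuel : Nat) (g paid : Int), g ≤ want → (want - g).toNat = fuel →
      best_buy_loop price promotion new_price want g paid = paid + (want - g) * price := by
  intro fuel
  induction fuel with
  | zero =>
    intro g paid hgw hfuel
    rw [best_buy_loop]
    have hge : g = want := by omega
    have : ¬ g < want := by omega
    simp only [this, dite_false]
    subst hge; ring
  | succ n ih =>
    intro g paid hgw hfuel
    have hlt : g < want := by omega
    rw [best_buy_loop]
    simp only [hlt, dite_true]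
    rw [if_neg (by rintro ⟨h, _⟩; exact h hp)]
    rw [ih (g + 1) _ (by omega) (by omega)]
    ring

-- ===== VERDICT (by name: the statement is the Claim_ definition above) =====
theorem best_buy_spec : Claim_equal_best_buy := by
  intro price promotion new_price want _
  unfold Spec_best_buy best_buy best_buy_alt
  by_cases hw : want ≤ 0
  · -- loop exits at once; n = 0 on the B side
    rw [best_buy_loop]
    have : ¬ (0:Int) < want := by omega
    simp only [this, dite_false]
    have hn : max want 0 = 0 := by omega
    simp [hn]
  · have hw1 : (1:Int) ≤ want := by omega
    have hn : max want 0 = want := by omega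
    by_cases hp : promotion = 0
    · rw [loop_price price promotion new_price want hp (want - 0).toNat 0 0 (by omega) rfl]
      simp [hn, hp]
    · rw [loop_closed price promotion new_price want hp hw1 (want - 0).toNat 0 0 (by omega) (by omega) rfl]
      have hm : (0:Int) < |promotion| := abs_pos.mpr hp
      simp only [hn, if_neg (by push Not; exact ⟨by omega, hp⟩ : ¬ (want = 0 ∨ promotion = 0))]
      rw [PySem.Int.floordiv_eq_ediv_of_pos hm]
      have : max (0:Int) 1 = 1 := by omega
      rw [this]
      simp
      ring
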